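-- pv_equiv track=rewrite | github.com/emu1200tra/ntu_intelligent_vehicle | hw3/Hw3-3.py | dfs_visit
-- ===== SOURCE A (Python) =====
-- def dfs_visit(vertex, adjlist, color, remove_edges):
-- 	color[vertex] = 1
-- 	isdag = True
-- 	for i in adjlist[vertex]:
-- 		if color[i] == 1:
-- 			isdag = False
-- 			remove_edges.append([vertex,i])
-- 		if color[i] == 0 and dfs_visit(i, adjlist, color, remove_edges) == False:
-- 			isdag = False
-- 	color[vertex] = 2
-- 	return isdag
-- ===== SOURCE B (Python) =====
-- def dfs_visit(vertex, adjlist, color, remove_edges):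
--     # Iterative DFS with an explicit stack of (vertex, neighbors, next-index) frames;
--     # the return value is "no back-edge was appended during this traversal".
--     base = len(remove_edges)
--     color[vertex] = 1
--     stack = [(vertex, adjlist[vertex], 0)]
--     while stack:
--         v, ns, k = stack[-1]
--         if k == len(ns):
--             color[v] = 2
--             stack.pop()
--         else:
--             i = ns[k]
--             stack[-1] = (v, ns, k + 1)
--             c = color[i]
--             if c == 1:
--                 remove_edges.append([v, i])
--             elif c == 0:
--                 color[i] = 1
--                 stack.append((i, adjlist[i], 0))
--     return len(remove_edges) == base
-- ===== Notes on version B (the rewrite author's own statement) =====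
-- stated objective: alternative
-- what changed: Recursive DFS threading an isdag flag is replaced by an iterative DFS over an explicit stack of (vertex, neighbors, index) frames, with the boolean recovered as 'remove_edges did not grow'; colors and the append order into remove_edges are identical.
import Mathlib
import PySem

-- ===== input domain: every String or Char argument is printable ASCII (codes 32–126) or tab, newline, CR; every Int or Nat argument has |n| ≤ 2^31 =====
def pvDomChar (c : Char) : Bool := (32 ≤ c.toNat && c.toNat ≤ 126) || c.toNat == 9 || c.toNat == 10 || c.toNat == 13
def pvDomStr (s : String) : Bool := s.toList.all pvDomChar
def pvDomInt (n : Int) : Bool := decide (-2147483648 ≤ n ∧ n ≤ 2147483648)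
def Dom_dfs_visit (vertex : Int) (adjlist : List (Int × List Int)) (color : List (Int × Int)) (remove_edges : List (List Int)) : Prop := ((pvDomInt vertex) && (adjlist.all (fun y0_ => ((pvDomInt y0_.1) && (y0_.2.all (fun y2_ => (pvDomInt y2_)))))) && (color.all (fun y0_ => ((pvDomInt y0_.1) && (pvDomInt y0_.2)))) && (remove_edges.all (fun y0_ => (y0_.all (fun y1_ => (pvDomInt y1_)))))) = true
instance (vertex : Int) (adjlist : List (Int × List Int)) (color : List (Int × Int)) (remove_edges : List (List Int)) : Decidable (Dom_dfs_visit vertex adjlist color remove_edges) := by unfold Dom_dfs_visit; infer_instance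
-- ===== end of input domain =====

-- B replaces A's recursive DFS (isdag flag) by an iterative DFS over an explicit frame stack, returning
-- "remove_edges did not grow" (objective: alternative). A mutates color/remove_edges in place; the
-- equivalence proved here is about the RETURN value only (B's Python performs the same mutations).

-- ===== PORT A =====
-- A's recursion is totalised with a fuel argument (depth bound color.length + 2, never reached on
-- Pre_ inputs); dict reads use getD defaults where Python would raise KeyError (outside Pre_).
mutual
def dfsA (fuel : Nat) (vertex : Int) (adj : PySem.Dict Int (List Int)) (color : PySem.Dict Int Int) (redges : List (List Int)) : Bool × PySem.Dict Int Int × List (List Int) :=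
  match fuel with
  | 0 => (true, color, redges)
  | f+1 =>
    let color1 := PySem.Dict.insert color vertex 1
    let r := loopA f vertex adj (PySem.Dict.getD adj vertex []) true color1 redges
    (r.1, PySem.Dict.insert r.2.1 vertex 2, r.2.2)
termination_by (fuel, 0)

def loopA (f : Nat) (vertex : Int) (adj : PySem.Dict Int (List Int)) (ns : List Int) (isdag : Bool) (color : PySem.Dict Int Int) (redges : List (List Int)) : Bool × PySem.Dict Int Int × List (List Int) :=
  match ns with
  | [] => (isdag, color, redges)
  | i :: rest =>
    let ci := PySem.Dict.getD color i 0
    let isdag1 := if ci = 1 then false else isdag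
    let redges1 := if ci = 1 then redges ++ [[vertex, i]] else redges
    if ci = 0 then
      let t := dfsA f i adj color redges1
      loopA f vertex adj rest (if t.1 = false then false else isdag1) t.2.1 t.2.2
    else
      loopA f vertex adj rest isdag1 color redges1
termination_by (f, ns.length + 1)

end

def dfs_visit (vertex : Int) (adjlist : List (Int × List Int)) (color : List (Int × Int)) (remove_edges : List (List Int)) : Bool :=
  (dfsA (color.length + 2) vertex (PySem.Dict.mk adjlist) (PySem.Dict.mk color) remove_edges).1

-- ===== PORT B =====
-- Source B's stack frame (v, ns, k) is ported as (v, ns[k:], fuel): the remaining-neighbour suffix plus a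
-- per-frame fuel (totality guard mirroring port A's fuel; never exhausted on Pre_ inputs).

-- termination measure helpers (cited by decreasing_by)
def maxAL (adj : PySem.Dict Int (List Int)) : Nat :=
  adj.items.foldr (fun p m => max p.2.length m) 0

def costT (adj : PySem.Dict Int (List Int)) : Nat → Nat
  | 0 => 1
  | f+1 => maxAL adj * costT adj f + 2

def frameCost (adj : PySem.Dict Int (List Int)) (fr : Int × List Int × Nat) : Nat :=
  fr.2.1.length * costT adj fr.2.2 + 1

theorem costT_pos (adj : PySem.Dict Int (List Int)) (f : Nat) : 0 < costT adj f := by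
  cases f <;> simp [costT]

theorem getD_length_le_maxAL (adj : PySem.Dict Int (List Int)) (i : Int) :
    ((PySem.Dict.getD adj i []).length ≤ maxAL adj) := by
  obtain ⟨l⟩ := adj
  induction l with
  | nil => simp [PySem.Dict.getD, PySem.Dict.get?, maxAL]
  | cons p rest ih =>
    obtain ⟨k, v⟩ := p
    simp only [PySem.Dict.getD_eq_get?_getD, PySem.Dict.get?_mk_cons] at *
    by_cases h : (k == i) = true
    · simp [h, maxAL]
    · simp only [h, Bool.false_eq_true, if_false]
      refine le_trans ih ?_
      simp [maxAL]

def machB (adj : PySem.Dict Int (List Int)) : List (Int × List Int × Nat) → PySem.Dict Int Int → List (List Int) → PySem.Dict Int Int × List (List Int)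
  | [], color, redges => (color, redges)
  | (v, [], _) :: stk, color, redges => machB adj stk (PySem.Dict.insert color v 2) redges
  | (v, i :: ns, f) :: stk, color, redges =>
    let c := PySem.Dict.getD color i 0
    if c = 1 then
      machB adj ((v, ns, f) :: stk) color (redges ++ [[v, i]])
    else if c = 0 then
      match f with
      | 0 => machB adj ((v, ns, 0) :: stk) color redges
      | g+1 => machB adj ((i, PySem.Dict.getD adj i [], g) :: (v, ns, g+1) :: stk) (PySem.Dict.insert color i 1) redges
    else
      machB adj ((v, ns, f) :: stk) color redges
termination_by stk _ _ => (stk.map (frameCost adj)).sum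
decreasing_by
  · simp [frameCost]
  · simp only [List.map_cons, List.sum_cons, frameCost, List.length_cons, add_mul, one_mul]
    have := costT_pos adj f
    omega
  · simp only [List.map_cons, List.sum_cons, frameCost, List.length_cons, add_mul, one_mul]
    have := costT_pos adj 0
    omega
  · simp only [List.map_cons, List.sum_cons, frameCost, List.length_cons, add_mul, one_mul]
    have h1 : (PySem.Dict.getD adj i []).length * costT adj g ≤ maxAL adj * costT adj g :=
      Nat.mul_le_mul_right _ (getD_length_le_maxAL adj i)
    have h2 : costT adj (g+1) = maxAL adj * costT adj g + 2 := rfl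
    simp only [Nat.succ_eq_add_one] at *
    omega
  · simp only [List.map_cons, List.sum_cons, frameCost, List.length_cons, add_mul, one_mul]
    have := costT_pos adj f
    omega

def dfs_visit_alt (vertex : Int) (adjlist : List (Int × List Int)) (color : List (Int × Int)) (remove_edges : List (List Int)) : Bool :=
  -- base = len(remove_edges); run the stack loop; return len(remove_edges) == base
  decide ((machB (PySem.Dict.mk adjlist)
      [(vertex, PySem.Dict.getD (PySem.Dict.mk adjlist) vertex [], color.length + 1)]
      (PySem.Dict.insert (PySem.Dict.mk color) vertex 1) remove_edges).2.length = remove_edges.length)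

-- ===== PRECONDITION & SPEC =====
-- Pre_ excludes exactly the inputs on which Python A raises KeyError: some vertex white-reachable from the
-- start (through neighbours whose INITIAL colour is 0) has no adjacency entry, or one of its scanned
-- neighbours (other than the start, which is coloured on entry) has no colour entry. pvReach is plain graph
-- reachability over the input's initial colours, not a re-run of either port.
def pvReachStep (vertex : Int) (adjlist : List (Int × List Int)) (color : List (Int × Int)) (s : List Int) : List Int :=
  PySem.Set.update s (s.flatMap (fun v =>
    (PySem.Dict.getD (PySem.Dict.mk adjlist) v []).filter
      (fun n => decide (n ≠ vertex) && (PySem.Dict.getD (PySem.Dict.mk color) n 1 == 0))))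

def pvReach (vertex : Int) (adjlist : List (Int × List Int)) (color : List (Int × Int)) : List Int :=
  (List.range (adjlist.length + 1)).foldl (fun s _ => pvReachStep vertex adjlist color s) [vertex]

def Pre_dfs_visit (vertex : Int) (adjlist : List (Int × List Int)) (color : List (Int × Int)) (remove_edges : List (List Int)) : Prop :=
  ∀ v ∈ pvReach vertex adjlist color,
    ((PySem.Dict.mk adjlist).contains v = true) ∧
    ∀ n ∈ PySem.Dict.getD (PySem.Dict.mk adjlist) v [],
      n = vertex ∨ (PySem.Dict.mk color).contains n = true
instance (vertex : Int) (adjlist : List (Int × List Int)) (color : List (Int × Int)) (remove_edges : List (List Int)) : Decidable (Pre_dfs_visit vertex adjlist color remove_edges) := by unfold Pre_dfs_visit; infer_instance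

def pvWitness_dfs_visit : Int × (List (Int × List Int)) × (List (Int × Int)) × List (List Int) :=
  (0, [(0, [1]), (1, [])], [(0, 0), (1, 0)], [])

def Spec_dfs_visit (vertex : Int) (adjlist : List (Int × List Int)) (color : List (Int × Int)) (remove_edges : List (List Int)) (out : Bool) : Prop := out = dfs_visit_alt vertex adjlist color remove_edges
instance (vertex : Int) (adjlist : List (Int × List Int)) (color : List (Int × Int)) (remove_edges : List (List Int)) (out : Bool) : Decidable (Spec_dfs_visit vertex adjlist color remove_edges out) := by unfold Spec_dfs_visit; infer_instance

-- ===== CLAIM (what is proved, stated in full; the proofs are below) =====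
def Claim_equal_dfs_visit : Prop := ∀ (vertex : Int) (adjlist : List (Int × List Int)) (color : List (Int × Int)) (remove_edges : List (List Int)), Dom_dfs_visit vertex adjlist color remove_edges → Pre_dfs_visit vertex adjlist color remove_edges → Spec_dfs_visit vertex adjlist color remove_edges (dfs_visit vertex adjlist color remove_edges)

-- ===== LEMMAS AND PROOFS =====

-- edge lists only ever grow (append-only), jointly for dfsA and loopA
theorem mono_joint (f : Nat) :
    (∀ v adj c e, ∃ t, (dfsA f v adj c e).2.2 = e ++ t) ∧
    (∀ v adj ns b c e, ∃ t, (loopA f v adj ns b c e).2.2 = e ++ t) := by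
  induction f with
  | zero =>
    refine ⟨fun v adj c e => ⟨[], by simp [dfsA]⟩, ?_⟩
    intro v adj ns
    induction ns with
    | nil => intro b c e; exact ⟨[], by simp [loopA]⟩
    | cons i rest ih =>
      intro b c e
      rw [loopA]
      by_cases h0 : PySem.Dict.getD c i 0 = 0
      · simp only [h0, dfsA]; norm_num
        obtain ⟨t, ht⟩ := ih b c e
        exact ⟨t, by simpa using ht⟩
      · by_cases h1 : PySem.Dict.getD c i 0 = 1
        · simp only [h1]; norm_num
          obtain ⟨t, ht⟩ := ih false c (e ++ [[v, i]])
          exact ⟨[[v, i]] ++ t, by simpa [List.append_assoc] using ht⟩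
        · simp only [if_neg h0, if_neg h1]
          exact ih _ c e
  | succ f ihf =>
    have hdfs : ∀ v adj c e, ∃ t, (dfsA (f+1) v adj c e).2.2 = e ++ t := by
      intro v adj c e
      rw [dfsA]
      obtain ⟨t, ht⟩ := ihf.2 v adj (PySem.Dict.getD adj v []) true (PySem.Dict.insert c v 1) e
      exact ⟨t, by simpa using ht⟩
    refine ⟨hdfs, ?_⟩
    intro v adj ns
    induction ns with
    | nil => intro b c e; exact ⟨[], by simp [loopA]⟩
    | cons i rest ih =>
      intro b c e
      rw [loopA]
      by_cases h0 : PySem.Dict.getD c i 0 = 0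
      · simp only [h0]; norm_num
        obtain ⟨t, ht⟩ := hdfs i adj c e
        obtain ⟨u, hu⟩ := ih ((dfsA (f+1) i adj c e).1 && b)
          (dfsA (f+1) i adj c e).2.1 (dfsA (f+1) i adj c e).2.2
        exact ⟨t ++ u, by rw [hu, ht, List.append_assoc]⟩
      · by_cases h1 : PySem.Dict.getD c i 0 = 1
        · simp only [h1]; norm_num
          obtain ⟨t, ht⟩ := ih false c (e ++ [[v, i]])
          exact ⟨[[v, i]] ++ t, by simpa [List.append_assoc] using ht⟩
        · simp only [if_neg h0, if_neg h1]
          exact ih _ c e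

-- the (color, edges) state of loopA does not depend on the incoming isdag flag
theorem loopA_state_flag (f : Nat) (v : Int) (adj : PySem.Dict Int (List Int)) :
    ∀ ns b c e, (loopA f v adj ns b c e).2 = (loopA f v adj ns true c e).2 := by
  intro ns
  induction ns with
  | nil => intro b c e; simp [loopA]
  | cons i rest ih =>
    intro b c e
    rw [loopA, loopA]
    by_cases h0 : PySem.Dict.getD c i 0 = 0
    · simp only [h0]; norm_num
      rw [ih]
      exact (ih _ _ _).symm
    · by_cases h1 : PySem.Dict.getD c i 0 = 1
      · simp only [h1]; norm_num
      · simp only [if_neg h0, if_neg h1]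
        rw [ih]

-- the isdag flag equals "no edge was appended", jointly for dfsA and loopA
theorem flag_joint (f : Nat) :
    (∀ v adj c e, (dfsA f v adj c e).1 = decide ((dfsA f v adj c e).2.2 = e)) ∧
    (∀ v adj ns b c e, (loopA f v adj ns b c e).1 = (b && decide ((loopA f v adj ns b c e).2.2 = e))) := by
  induction f with
  | zero =>
    refine ⟨fun v adj c e => by simp [dfsA], ?_⟩
    intro v adj ns
    induction ns with
    | nil => intro b c e; simp [loopA]
    | cons i rest ih =>
      intro b c e
      rw [loopA]
      by_cases h0 : PySem.Dict.getD c i 0 = 0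
      · simp only [h0, dfsA]; norm_num
        simpa using ih b c e
      · by_cases h1 : PySem.Dict.getD c i 0 = 1
        · simp only [h1]; norm_num
          obtain ⟨t, ht⟩ := (mono_joint 0).2 v adj rest false c (e ++ [[v, i]])
          rw [ih false c (e ++ [[v, i]]), ht]
          simp
        · simp only [if_neg h0, if_neg h1]
          exact ih _ c e
  | succ f ihf =>
    have hdfs : ∀ v adj c e, (dfsA (f+1) v adj c e).1 = decide ((dfsA (f+1) v adj c e).2.2 = e) := by
      intro v adj c e
      rw [dfsA]
      simpa using ihf.2 v adj (PySem.Dict.getD adj v []) true (PySem.Dict.insert c v 1) e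
    refine ⟨hdfs, ?_⟩
    intro v adj ns
    induction ns with
    | nil => intro b c e; simp [loopA]
    | cons i rest ih =>
      intro b c e
      rw [loopA]
      by_cases h0 : PySem.Dict.getD c i 0 = 0
      · simp only [h0]; norm_num
        obtain ⟨t, ht⟩ := (mono_joint (f+1)).1 i adj c e
        obtain ⟨u, hu⟩ := (mono_joint (f+1)).2 v adj rest
          ((dfsA (f+1) i adj c e).1 && b) (dfsA (f+1) i adj c e).2.1 (dfsA (f+1) i adj c e).2.2
        rw [ih _ (dfsA (f+1) i adj c e).2.1 (dfsA (f+1) i adj c e).2.2, hu, hdfs i adj c e, ht]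
        by_cases hT : t = []
        · by_cases hU : u = [] <;> simp [hT, hU]
        · have h1 : ¬ (e ++ t = e) := fun h => hT (by simpa using h)
          simp [h1, hT]
      · by_cases h1 : PySem.Dict.getD c i 0 = 1
        · simp only [h1]; norm_num
          obtain ⟨t, ht⟩ := (mono_joint (f+1)).2 v adj rest false c (e ++ [[v, i]])
          rw [ih false c (e ++ [[v, i]]), ht]
          simp
        · simp only [if_neg h0, if_neg h1]
          exact ih _ c e

-- simulation: one stack frame of machB performs exactly one loopA run followed by the v := 2 recolouring
theorem machB_frame (adj : PySem.Dict Int (List Int)) (f : Nat) :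
    ∀ ns v stk c e,
      machB adj ((v, ns, f) :: stk) c e
        = machB adj stk (PySem.Dict.insert (loopA f v adj ns true c e).2.1 v 2) ((loopA f v adj ns true c e).2.2) := by
  induction f with
  | zero =>
    intro ns
    induction ns with
    | nil => intro v stk c e; rw [machB]; simp [loopA]
    | cons i rest ih =>
      intro v stk c e
      rw [machB, loopA]
      by_cases h1 : PySem.Dict.getD c i 0 = 1
      · simp only [h1]; norm_num
        rw [ih v stk c (e ++ [[v, i]])]
        rw [loopA_state_flag 0 v adj rest false c (e ++ [[v, i]])]
      · by_cases h0 : PySem.Dict.getD c i 0 = 0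
        · simp only [h0, dfsA]; norm_num
          exact ih v stk c e
        · simp only [if_neg h0, if_neg h1]
          exact ih v stk c e
  | succ g ihf =>
    intro ns
    induction ns with
    | nil => intro v stk c e; rw [machB]; simp [loopA]
    | cons i rest ih =>
      intro v stk c e
      rw [machB, loopA]
      by_cases h1 : PySem.Dict.getD c i 0 = 1
      · simp only [h1]; norm_num
        rw [ih v stk c (e ++ [[v, i]])]
        rw [loopA_state_flag (g+1) v adj rest false c (e ++ [[v, i]])]
      · by_cases h0 : PySem.Dict.getD c i 0 = 0
        · simp only [h0]; norm_num
          rw [ihf (PySem.Dict.getD adj i []) i ((v, rest, g+1) :: stk) (PySem.Dict.insert c i 1) e]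
          rw [ih v stk _ _]
          have hd : dfsA (g+1) i adj c e
              = ((loopA g i adj (PySem.Dict.getD adj i []) true (PySem.Dict.insert c i 1) e).1,
                 PySem.Dict.insert (loopA g i adj (PySem.Dict.getD adj i []) true (PySem.Dict.insert c i 1) e).2.1 i 2,
                 (loopA g i adj (PySem.Dict.getD adj i []) true (PySem.Dict.insert c i 1) e).2.2) := by
            rw [dfsA]
          simp only [hd]
          rw [loopA_state_flag (g+1) v adj rest
            ((loopA g i adj (PySem.Dict.getD adj i []) true (PySem.Dict.insert c i 1) e).1) _ _]
        · simp only [if_neg h0, if_neg h1]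
          exact ih v stk c e

-- ===== VERDICT (by name: the statement is the Claim_ definition above) =====
theorem dfs_visit_spec : Claim_equal_dfs_visit := by
  intro vertex adjlist color remove_edges _ _
  unfold Spec_dfs_visit dfs_visit dfs_visit_alt
  rw [show color.length + 2 = (color.length + 1) + 1 from rfl, dfsA]
  rw [machB_frame (PySem.Dict.mk adjlist) (color.length + 1)
      (PySem.Dict.getD (PySem.Dict.mk adjlist) vertex []) vertex []
      (PySem.Dict.insert (PySem.Dict.mk color) vertex 1) remove_edges]
  rw [machB]
  dsimp only
  rw [(flag_joint (color.length + 1)).2 vertex (PySem.Dict.mk adjlist)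
      (PySem.Dict.getD (PySem.Dict.mk adjlist) vertex []) true
      (PySem.Dict.insert (PySem.Dict.mk color) vertex 1) remove_edges]
  obtain ⟨t, ht⟩ := (mono_joint (color.length + 1)).2 vertex (PySem.Dict.mk adjlist)
      (PySem.Dict.getD (PySem.Dict.mk adjlist) vertex []) true
      (PySem.Dict.insert (PySem.Dict.mk color) vertex 1) remove_edges
  rw [ht]
  by_cases hT : t = []
  · simp [hT]
  · simp [hT]
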